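-- pv_equiv track=rewrite | github.com/lizhiyuann/AI_Hackathon | os-agent/src/interface/api.py | parse_powershell_table
-- ===== SOURCE A (Python) =====
-- def parse_powershell_table(raw_output: str) -> tuple:
--     """通用解析PowerShell Format-Table -AutoSize输出，返回(列名列表, 数据行列表)"""
--     lines = raw_output.strip().split('\n')
--     data_lines = []
--     header_line = None
--     sep_found = False
--
--     for line in lines:
--         stripped = line.strip()
--         if not stripped:
--             continue
--         if stripped.startswith("----") or stripped.startswith("---"):
--             sep_found = True
--             continue
--         if not sep_found and header_line is None:
--             header_line = stripped
--             continue
--         if sep_found: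
--             data_lines.append(stripped)
--
--     # 解析表头（PowerShell Format-Table 列名用连续空格分隔）
--     headers = header_line.split() if header_line else []
--
--     # 如果没有找到分隔线，可能只有一行数据
--     if not sep_found and header_line:
--         data_lines = [header_line]
--         headers = []
--
--     return headers, data_lines
-- ===== SOURCE B (Python) =====
-- def parse_powershell_table(raw_output: str) -> tuple:
--     """Slice-and-filter reformulation: clean the lines once, locate the first
--     separator line, and derive headers/data by slicing instead of a stateful loop."""
--     nonempty = [s for s in (l.strip() for l in raw_output.strip().split('\n')) if s]
--     sep_idx = next((i for i, s in enumerate(nonempty) if s.startswith('---')), None)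
--     if sep_idx is None:
--         return ([], [nonempty[0]]) if nonempty else ([], [])
--     headers = nonempty[0].split() if sep_idx > 0 else []
--     data = [s for s in nonempty[sep_idx + 1:] if not s.startswith('---')]
--     return headers, data
-- ===== Notes on version B (the rewrite author's own statement) =====
-- stated objective: simpler
-- what changed: Replaces A's stateful three-variable accumulation loop and post-hoc fixups with a slice-and-filter pipeline: clean the lines once, find the first separator index, and obtain headers/data by slicing and filtering.
import Mathlib
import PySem

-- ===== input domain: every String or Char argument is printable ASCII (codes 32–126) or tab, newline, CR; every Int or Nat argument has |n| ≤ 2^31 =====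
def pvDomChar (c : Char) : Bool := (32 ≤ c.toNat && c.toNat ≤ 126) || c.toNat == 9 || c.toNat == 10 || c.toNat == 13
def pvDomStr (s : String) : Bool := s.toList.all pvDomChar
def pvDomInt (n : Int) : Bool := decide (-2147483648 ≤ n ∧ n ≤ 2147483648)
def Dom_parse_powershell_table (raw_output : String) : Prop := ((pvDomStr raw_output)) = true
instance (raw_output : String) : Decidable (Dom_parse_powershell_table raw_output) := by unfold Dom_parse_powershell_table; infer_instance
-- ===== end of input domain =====

-- B replaces A's stateful accumulation loop by a slice-and-filter pipeline (objective: simpler).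

-- raw.strip().split('\n')  (Chars.splitOn is the sep ≠ "" form of str.split)
def pwtLines (raw_output : String) : List String :=
  (PySem.Chars.splitOn (PySem.Str.strip raw_output).toList "\n".toList).map String.ofList

-- ===== PORT A =====
-- one loop iteration of A: state (data_lines, header_line, sep_found)
def pwtStep (st : List String × Option String × Bool) (line : String) :
    List String × Option String × Bool :=
  match st with
  | (data, header, sep) =>
    let stripped := PySem.Str.strip line
    if stripped == "" then (data, header, sep)
    else if PySem.Str.startswith stripped "----" || PySem.Str.startswith stripped "---" then
      (data, header, true)
    else if !sep && header.isNone then (data, some stripped, sep)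
    else if sep then (data ++ [stripped], header, sep)
    else (data, header, sep)

def parse_powershell_table (raw_output : String) : List String × List String :=
  match (pwtLines raw_output).foldl pwtStep ([], none, false) with
  | (data, header, sep) =>
    let headers := match header with
      | none => []
      | some h => if h == "" then [] else PySem.Str.split₀ h
    match header with
    | some h => if !sep && h != "" then ([], [h]) else (headers, data)
    | none => (headers, data)

-- ===== PORT B =====
def parse_powershell_table_alt (raw_output : String) : List String × List String :=
  let nonempty := ((pwtLines raw_output).map PySem.Str.strip).filter (fun s => s != "")
  match nonempty.findIdx? (fun s => PySem.Str.startswith s "---") with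
  | none =>
    match nonempty with
    | x :: _ => ([], [x])
    | [] => ([], [])
  | some k =>
    let headers := if k > 0 then
        (match nonempty with | x :: _ => PySem.Str.split₀ x | [] => [])
      else []
    (headers, (nonempty.drop (k + 1)).filter (fun s => !PySem.Str.startswith s "---"))

-- ===== PRECONDITION & SPEC =====
def Spec_parse_powershell_table (raw_output : String) (out : List String × List String) : Prop := out = parse_powershell_table_alt raw_output
instance (raw_output : String) (out : List String × List String) : Decidable (Spec_parse_powershell_table raw_output out) := by unfold Spec_parse_powershell_table; infer_instance

-- ===== CLAIM (what is proved, stated in full; the proofs are below) =====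
def Claim_equal_parse_powershell_table : Prop := ∀ (raw_output : String), Dom_parse_powershell_table raw_output → Spec_parse_powershell_table raw_output (parse_powershell_table raw_output)

-- ===== LEMMAS AND PROOFS =====

-- A's step on an already-stripped, nonempty line (the lines the filter keeps)
def pwtStep2 (st : List String × Option String × Bool) (s : String) :
    List String × Option String × Bool :=
  match st with
  | (data, header, sep) =>
    if PySem.Str.startswith s "---" then (data, header, true)
    else if !sep && header.isNone then (data, some s, sep)
    else if sep then (data ++ [s], header, sep)
    else (data, header, sep)

theorem startswith_four_of (cs : List Char)
    (h : PySem.Chars.startswith cs ['-', '-', '-', '-'] = true) :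
    PySem.Chars.startswith cs ['-', '-', '-'] = true := by
  rw [PySem.Chars.startswith_iff] at h ⊢
  exact List.IsPrefix.trans (by decide) h

theorem foldl_step_eq (lines : List String) (st : List String × Option String × Bool) :
    lines.foldl pwtStep st =
      ((lines.map PySem.Str.strip).filter (fun s => s != "")).foldl pwtStep2 st := by
  induction lines generalizing st with
  | nil => rfl
  | cons l ls ih =>
    simp only [List.foldl_cons, List.map_cons, List.filter_cons]
    by_cases he : PySem.Str.strip l = ""
    · have : pwtStep st l = st := by
        unfold pwtStep; obtain ⟨d, h, s⟩ := st; simp [he]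
      rw [this, ih]
      simp [he]
    · have hne : (PySem.Str.strip l != "") = true := by simp [he]
      rw [if_pos hne, List.foldl_cons]
      have : pwtStep st l = pwtStep2 st (PySem.Str.strip l) := by
        unfold pwtStep pwtStep2
        obtain ⟨d, h, s⟩ := st
        simp only [PySem.Str.startswith_eq]
        rw [if_neg (by simpa using he)]
        by_cases h4 : PySem.Chars.startswith (PySem.Chars.strip l.toList) ['-', '-', '-', '-'] = true
        · simp [h4, startswith_four_of _ h4]
        · simp [h4]
      rw [this, ih]

-- after the separator was seen, the loop just appends every non-separator line
theorem foldl_step2_sep (xs : List String) (data : List String) (h : Option String) :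
    xs.foldl pwtStep2 (data, h, true) =
      (data ++ xs.filter (fun s => !PySem.Str.startswith s "---"), h, true) := by
  induction xs generalizing data with
  | nil => simp
  | cons x t ih =>
    by_cases hx : PySem.Chars.startswith x.toList ['-', '-', '-'] = true
    · have hst : pwtStep2 (data, h, true) x = (data, h, true) := by simp [pwtStep2, hx]
      simp only [List.foldl_cons, hst, List.filter_cons]
      rw [ih]
      simp [hx]
    · have hst : pwtStep2 (data, h, true) x = (data ++ [x], h, true) := by simp [pwtStep2, hx]
      simp only [List.foldl_cons, hst, List.filter_cons]
      rw [ih]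
      simp [hx]

-- with the header captured and no separator yet, the loop ignores lines until the separator
theorem foldl_step2_hdr (xs : List String) (data : List String) (h : String) :
    xs.foldl pwtStep2 (data, some h, false) =
      match xs.findIdx? (fun s => PySem.Str.startswith s "---") with
      | none => (data, some h, false)
      | some k => (data ++ ((xs.drop (k + 1)).filter (fun s => !PySem.Str.startswith s "---")),
          some h, true) := by
  induction xs with
  | nil => simp
  | cons x t ih =>
    rw [List.findIdx?_cons]
    by_cases hx : PySem.Chars.startswith x.toList ['-', '-', '-'] = true
    · have hst : pwtStep2 (data, some h, false) x = (data, some h, true) := by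
        simp [pwtStep2, hx]
      rw [if_pos (by simpa using hx)]
      simp only [List.foldl_cons, hst, foldl_step2_sep]
      simp
    · have hst : pwtStep2 (data, some h, false) x = (data, some h, false) := by
        simp [pwtStep2, hx]
      rw [if_neg (by simpa using hx)]
      simp only [List.foldl_cons, hst, ih]
      cases t.findIdx? (fun s => PySem.Str.startswith s "---") with
      | none => simp
      | some k => simp [List.drop_succ_cons]

-- ===== VERDICT (by name: the statement is the Claim_ definition above) =====
theorem parse_powershell_table_spec : Claim_equal_parse_powershell_table := by
  intro raw _
  unfold Spec_parse_powershell_table parse_powershell_table parse_powershell_table_alt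
  rw [foldl_step_eq]
  cases hcase : ((pwtLines raw).map PySem.Str.strip).filter (fun s => s != "") with
  | nil => simp
  | cons x t =>
    have hxmem : x ∈ ((pwtLines raw).map PySem.Str.strip).filter (fun s => s != "") := by
      rw [hcase]; exact List.mem_cons_self
    have hx0 : (x != "") = true := (List.mem_filter.mp hxmem).2
    have hxne : ¬ x = "" := by simpa using hx0
    dsimp only
    by_cases hx : PySem.Chars.startswith x.toList ['-', '-', '-'] = true
    · -- separator first: no header
      have hstep : pwtStep2 ([], none, false) x = ([], none, true) := by simp [pwtStep2, hx]
      rw [List.findIdx?_cons, if_pos (by simpa using hx)]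
      simp only [List.foldl_cons, hstep, foldl_step2_sep]
      simp
    · have hstep : pwtStep2 ([], none, false) x = ([], some x, false) := by simp [pwtStep2, hx]
      rw [List.findIdx?_cons, if_neg (by simpa using hx)]
      simp only [List.foldl_cons, hstep, foldl_step2_hdr]
      cases hfi : t.findIdx? (fun s => PySem.Str.startswith s "---") with
      | none => simp [hxne]
      | some k => simp [hxne, List.drop_succ_cons]
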